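-- pv_equiv track=rewrite | github.com/leenux/ir-code-gen | midea.py | r05d_encode
-- ===== SOURCE A (Python) =====
-- def r05d_encode(address, command1, command2):
--     """
--     生成美的空调R05D红外编码数据序列
--     :param address: 地址码（8位）
--     :param command1: 命令码1（8位）
--     :param command2: 命令码2（8位）
--     :return: R05D红外编码数据序列
--     """
--     # R05D红外编码参数（单位：微秒）
--     header_mark = 4400
--     header_space = 4400
--     bit_mark = 540
--     zero_space = 540
--     one_space = 1620
--     interval_mark = 540
--     interval_space = 5220
--     end_space = 20000
--
--     # 初始化数据序列
--     data_sequence = []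
--
--     # 添加引导码
--     data_sequence.append((header_mark))
--     data_sequence.append((header_space))
--
--     # 添加地址码和地址反码
--     for i in range(8):
--         bit = (address >> (7 - i)) & 1
--         data_sequence.append((bit_mark))
--         data_sequence.append((one_space if bit else zero_space))
--     address_inv = ~address & 0xFF
--     for i in range(8):
--         bit = (address_inv >> (7 - i)) & 1
--         data_sequence.append((bit_mark))
--         data_sequence.append((one_space if bit else zero_space))
--
--     # 添加命令码1和命令码1反码
--     for i in range(8):
--         bit = (command1 >> (7 - i)) & 1
--         data_sequence.append((bit_mark))
--         data_sequence.append((one_space if bit else zero_space))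
--     command1_inv = ~command1 & 0xFF
--     for i in range(8):
--         bit = (command1_inv >> (7 - i)) & 1
--         data_sequence.append((bit_mark))
--         data_sequence.append((one_space if bit else zero_space))
--
--     # 添加命令码2和命令码2反码
--     for i in range(8):
--         bit = (command2 >> (7 - i)) & 1
--         data_sequence.append((bit_mark))
--         data_sequence.append((one_space if bit else zero_space))
--     command2_inv = ~command2 & 0xFF
--     for i in range(8):
--         bit = (command2_inv >> (7 - i)) & 1
--         data_sequence.append((bit_mark))
--         data_sequence.append((one_space if bit else zero_space))
--
--     # 添加间隔码
--     data_sequence.append((interval_mark))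
--     data_sequence.append((interval_space))
--
--     # 重复上述过程
--     data_sequence.append((header_mark))
--     data_sequence.append((header_space))
--
--     for i in range(8):
--         bit = (address >> (7 - i)) & 1
--         data_sequence.append((bit_mark))
--         data_sequence.append((one_space if bit else zero_space))
--     for i in range(8):
--         bit = (address_inv >> (7 - i)) & 1
--         data_sequence.append((bit_mark))
--         data_sequence.append((one_space if bit else zero_space))
--
--     for i in range(8):
--         bit = (command1 >> (7 - i)) & 1
--         data_sequence.append((bit_mark))
--         data_sequence.append((one_space if bit else zero_space))
--     for i in range(8):
--         bit = (command1_inv >> (7 - i)) & 1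
--         data_sequence.append((bit_mark))
--         data_sequence.append((one_space if bit else zero_space))
--
--     for i in range(8):
--         bit = (command2 >> (7 - i)) & 1
--         data_sequence.append((bit_mark))
--         data_sequence.append((one_space if bit else zero_space))
--     for i in range(8):
--         bit = (command2_inv >> (7 - i)) & 1
--         data_sequence.append((bit_mark))
--         data_sequence.append((one_space if bit else zero_space))
--
--     # 添加结束脉冲
--     data_sequence.append((end_space))
--
--     return data_sequence
-- ===== SOURCE B (Python) =====
-- def r05d_encode(address, command1, command2):
--     """Alternative: build a 256-entry pulse table by doubling (DP, no bit
--     extraction), then index it with each byte and its byte-complement; one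
--     computed frame serves both transmissions."""
--     table = [[]]
--     for _ in range(8):
--         table = [t + s for t in table for s in ([540, 540], [540, 1620])]
--     frame = [4400, 4400]
--     for b in (address, command1, command2):
--         v = b & 0xFF
--         frame += table[v] + table[255 - v]
--     return frame + [540, 5220] + frame + [20000]
-- ===== Notes on version B (the rewrite author's own statement) =====
-- stated objective: alternative
-- what changed: Replaces A's twelve unrolled MSB-first bit-extraction loops with a 256-entry pulse lookup table built by doubling (no bit extraction), indexed by each masked byte and its XOR-complement, with one computed frame reused for both transmissions.
import Mathlib
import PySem

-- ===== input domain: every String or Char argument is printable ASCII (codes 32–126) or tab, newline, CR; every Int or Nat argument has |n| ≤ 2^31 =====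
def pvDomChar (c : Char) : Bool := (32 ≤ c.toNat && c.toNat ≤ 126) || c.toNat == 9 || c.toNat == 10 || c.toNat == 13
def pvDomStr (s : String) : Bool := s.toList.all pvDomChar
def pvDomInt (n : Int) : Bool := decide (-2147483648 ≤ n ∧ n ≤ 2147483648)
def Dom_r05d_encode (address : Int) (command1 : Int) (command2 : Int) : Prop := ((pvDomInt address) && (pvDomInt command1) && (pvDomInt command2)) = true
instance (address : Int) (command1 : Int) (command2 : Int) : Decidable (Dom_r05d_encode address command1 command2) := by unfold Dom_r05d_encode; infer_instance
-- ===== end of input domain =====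

-- B replaces A's twelve unrolled MSB-first bit-extraction loops by a 256-entry pulse
-- lookup table built by doubling, indexed with each masked byte and its byte-complement,
-- one computed frame reused for both transmissions (alternative decomposition; same result).

-- ===== PORT A =====
-- one iteration of A's inner 8-bit loop: append bit_mark and the space chosen by bit = (x >> (7-i)) & 1
def pvStepA (x : Int) (ds : List Int) (i : Int) : List Int :=
  ds ++ [540, if PySem.Int.band (x >>> (7 - i).toNat) 1 ≠ 0 then 1620 else 540]

def r05d_encode (address : Int) (command1 : Int) (command2 : Int) : List Int :=
  let address_inv : Int := PySem.Int.band (Int.not address) 0xFF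
  let command1_inv : Int := PySem.Int.band (Int.not command1) 0xFF
  let command2_inv : Int := PySem.Int.band (Int.not command2) 0xFF
  let ds : List Int := [4400, 4400]
  let ds := (PySem.List.pyRange 0 8 1).foldl (pvStepA address) ds
  let ds := (PySem.List.pyRange 0 8 1).foldl (pvStepA address_inv) ds
  let ds := (PySem.List.pyRange 0 8 1).foldl (pvStepA command1) ds
  let ds := (PySem.List.pyRange 0 8 1).foldl (pvStepA command1_inv) ds
  let ds := (PySem.List.pyRange 0 8 1).foldl (pvStepA command2) ds
  let ds := (PySem.List.pyRange 0 8 1).foldl (pvStepA command2_inv) ds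
  let ds := ds ++ [540, 5220]
  let ds := ds ++ [4400, 4400]
  let ds := (PySem.List.pyRange 0 8 1).foldl (pvStepA address) ds
  let ds := (PySem.List.pyRange 0 8 1).foldl (pvStepA address_inv) ds
  let ds := (PySem.List.pyRange 0 8 1).foldl (pvStepA command1) ds
  let ds := (PySem.List.pyRange 0 8 1).foldl (pvStepA command1_inv) ds
  let ds := (PySem.List.pyRange 0 8 1).foldl (pvStepA command2) ds
  let ds := (PySem.List.pyRange 0 8 1).foldl (pvStepA command2_inv) ds
  ds ++ [20000]

-- ===== PORT B =====
-- one doubling step: table = [t + s for t in table for s in ([540,540],[540,1620])]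
def pvTableStep (tb : List (List Int)) (_ : Int) : List (List Int) :=
  tb.flatMap (fun t => [t ++ [540, 540], t ++ [540, 1620]])

def r05d_encode_alt (address : Int) (command1 : Int) (command2 : Int) : List Int :=
  let table : List (List Int) := (PySem.List.pyRange 0 8 1).foldl pvTableStep [[]]
  let frame : List Int :=
    [address, command1, command2].foldl
      (fun f b =>
        let v : Int := PySem.Int.band b 255
        f ++ ((PySem.List.pyGet? table v).getD [] ++
              (PySem.List.pyGet? table (255 - v)).getD []))
      [4400, 4400]
  frame ++ [540, 5220] ++ frame ++ [20000]

-- ===== PRECONDITION & SPEC =====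
def Spec_r05d_encode (address : Int) (command1 : Int) (command2 : Int) (out : List Int) : Prop := out = r05d_encode_alt address command1 command2
instance (address : Int) (command1 : Int) (command2 : Int) (out : List Int) : Decidable (Spec_r05d_encode address command1 command2 out) := by unfold Spec_r05d_encode; infer_instance

-- ===== CLAIM (what is proved, stated in full; the proofs are below) =====
def Claim_equal_r05d_encode : Prop := ∀ (address : Int) (command1 : Int) (command2 : Int), Dom_r05d_encode address command1 command2 → Spec_r05d_encode address command1 command2 (r05d_encode address command1 command2)

-- ===== LEMMAS AND PROOFS =====

-- A's 8-iteration bit chunk for one byte, and B's table, as named values for the proofs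
def pvChunkA (x : Int) : List Int := (PySem.List.pyRange 0 8 1).foldl (pvStepA x) []

def pvTableList : List (List Int) := (PySem.List.pyRange 0 8 1).foldl pvTableStep [[]]

-- MSB-first pulses of the low k bits of v (LSB appended last) — the invariant shape of B's table
def pvEncBits : Nat → Nat → List Int
  | 0, _ => []
  | k + 1, v => pvEncBits k (v / 2) ++ [540, if v % 2 = 1 then (1620 : Int) else 540]

def pvT : Nat → List (List Int)
  | 0 => [[]]
  | k + 1 => pvTableStep (pvT k) 0

theorem pv_range_up : PySem.List.pyRange 0 8 1 = [0, 1, 2, 3, 4, 5, 6, 7] := by decide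

theorem pv_fold (x : Int) (acc : List Int) :
    (PySem.List.pyRange 0 8 1).foldl (pvStepA x) acc = acc ++ pvChunkA x := by
  unfold pvChunkA
  rw [pv_range_up]
  simp only [pvStepA, List.foldl_cons, List.foldl_nil, List.nil_append, List.append_assoc]

theorem pv_band255 (y : Int) : PySem.Int.band y 255 = y % 256 := by
  have hm : ∀ m : Nat, m &&& 255 = m % 256 := by
    intro m
    have := Nat.and_two_pow_sub_one_eq_mod m 8
    norm_num at this
    omega
  unfold PySem.Int.band
  split_ifs with h1 h2 h2
  · have h := hm y.toNat
    simp only [show Int.toNat 255 = 255 from rfl]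
    rw [h]; omega
  · omega
  · have h := hm ((-y - 1).toNat)
    simp only [show Int.toNat 255 = 255 from rfl]
    rw [Nat.land_comm, h]; omega
  · omega

theorem pv_not (y : Int) : Int.not y = -y - 1 := by
  have h0 : ∀ m : Nat, Int.not (Int.ofNat m) = Int.negSucc m := fun _ => rfl
  have h1 : ∀ m : Nat, Int.not (Int.negSucc m) = Int.ofNat m := fun _ => rfl
  cases y with
  | ofNat m => rw [h0]; simp only [Int.negSucc_eq, Int.ofNat_eq_natCast]; omega
  | negSucc m => rw [h1]; simp only [Int.negSucc_eq, Int.ofNat_eq_natCast]; omega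

theorem pv_ite (x : Int) (k : Nat) (hk : k < 8) :
    (if PySem.Int.band (x >>> k) 1 ≠ 0 then (1620 : Int) else 540) =
    (if PySem.Int.band ((x % 256) >>> k) 1 ≠ 0 then (1620 : Int) else 540) := by
  have h1 := PySem.Int.band_one (x >>> k)
  have h2 := PySem.Int.band_one ((x % 256) >>> k)
  rw [h1, h2, PySem.Int.mod_eq_emod_of_pos (by omega), PySem.Int.mod_eq_emod_of_pos (by omega)]
  have e1 := Int.shiftRight_eq_div_pow x k
  have e2 := Int.shiftRight_eq_div_pow (x % 256) k
  rw [e1, e2]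
  interval_cases k <;> norm_num <;> omega

theorem pv_chunk_mod (x : Int) : pvChunkA x = pvChunkA (x % 256) := by
  unfold pvChunkA
  rw [pv_range_up]
  simp only [pvStepA, List.foldl_cons, List.foldl_nil, List.nil_append, List.append_assoc,
    show ((7:Int) - 0).toNat = 7 from rfl, show ((7:Int) - 1).toNat = 6 from rfl,
    show ((7:Int) - 2).toNat = 5 from rfl, show ((7:Int) - 3).toNat = 4 from rfl,
    show ((7:Int) - 4).toNat = 3 from rfl, show ((7:Int) - 5).toNat = 2 from rfl,
    show ((7:Int) - 6).toNat = 1 from rfl, show ((7:Int) - 7).toNat = 0 from rfl]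
  rw [pv_ite x 7 (by omega), pv_ite x 6 (by omega), pv_ite x 5 (by omega),
      pv_ite x 4 (by omega), pv_ite x 3 (by omega), pv_ite x 2 (by omega),
      pv_ite x 1 (by omega), pv_ite x 0 (by omega)]

-- one bit of a natural number, read through Int shift-and-mask vs Nat division
theorem pv_bit_iff (n : Nat) (k : Nat) :
    (PySem.Int.band (((n : Nat) : Int) >>> k) 1 ≠ 0) ↔ (n / 2 ^ k % 2 = 1) := by
  rw [PySem.Int.band_one, PySem.Int.mod_eq_emod_of_pos (by omega),
    Int.shiftRight_eq_div_pow]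
  rw [show ((n : Int) / ((2 ^ k : Nat) : Int)) = ((n / 2 ^ k : Nat) : Int) from
    (Int.natCast_div n (2 ^ k)).symm]
  generalize n / 2 ^ k = a
  omega

theorem pv_chunk_enc (n : Nat) : pvChunkA ((n : Nat) : Int) = pvEncBits 8 n := by
  have hrfl : pvEncBits 8 n =
      [540, if n / 2 / 2 / 2 / 2 / 2 / 2 / 2 % 2 = 1 then (1620 : Int) else 540] ++
      ([540, if n / 2 / 2 / 2 / 2 / 2 / 2 % 2 = 1 then (1620 : Int) else 540] ++
      ([540, if n / 2 / 2 / 2 / 2 / 2 % 2 = 1 then (1620 : Int) else 540] ++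
      ([540, if n / 2 / 2 / 2 / 2 % 2 = 1 then (1620 : Int) else 540] ++
      ([540, if n / 2 / 2 / 2 % 2 = 1 then (1620 : Int) else 540] ++
      ([540, if n / 2 / 2 % 2 = 1 then (1620 : Int) else 540] ++
      ([540, if n / 2 % 2 = 1 then (1620 : Int) else 540] ++
       [540, if n % 2 = 1 then (1620 : Int) else 540])))))) := by
    show pvEncBits 8 n = _
    simp only [pvEncBits, List.nil_append, List.append_assoc]
  rw [hrfl]
  unfold pvChunkA
  rw [pv_range_up]
  simp only [pvStepA, List.foldl_cons, List.foldl_nil, List.nil_append, List.append_assoc,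
    show ((7:Int) - 0).toNat = 7 from rfl, show ((7:Int) - 1).toNat = 6 from rfl,
    show ((7:Int) - 2).toNat = 5 from rfl, show ((7:Int) - 3).toNat = 4 from rfl,
    show ((7:Int) - 4).toNat = 3 from rfl, show ((7:Int) - 5).toNat = 2 from rfl,
    show ((7:Int) - 6).toNat = 1 from rfl, show ((7:Int) - 7).toNat = 0 from rfl]
  rw [if_congr (pv_bit_iff n 7) rfl rfl, if_congr (pv_bit_iff n 6) rfl rfl,
      if_congr (pv_bit_iff n 5) rfl rfl, if_congr (pv_bit_iff n 4) rfl rfl,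
      if_congr (pv_bit_iff n 3) rfl rfl, if_congr (pv_bit_iff n 2) rfl rfl,
      if_congr (pv_bit_iff n 1) rfl rfl, if_congr (pv_bit_iff n 0) rfl rfl]
  norm_num [Nat.div_div_eq_div_mul]

theorem pv_tab_T : pvTableList = pvT 8 := by
  rfl

theorem pv_range_two (m : Nat) :
    List.range (2 * m) = (List.range m).flatMap (fun v => [2 * v, 2 * v + 1]) := by
  induction m with
  | zero => rfl
  | succ m ih =>
    rw [show 2 * (m + 1) = (2 * m) + 1 + 1 by ring, List.range_succ, List.range_succ,
      List.range_succ, List.flatMap_append, ih]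
    simp

theorem pv_tab_enc : ∀ k : Nat, pvT k = (List.range (2 ^ k)).map (fun v => pvEncBits k v) := by
  intro k
  induction k with
  | zero => rfl
  | succ k ih =>
    show pvTableStep (pvT k) 0 = _
    rw [ih]
    unfold pvTableStep
    rw [pow_succ, show (2 : Nat) ^ k * 2 = 2 * 2 ^ k by ring, pv_range_two]
    rw [List.flatMap_map, List.map_flatMap]
    congr 1
    funext v
    simp only [List.map_cons, List.map_nil]
    rw [show pvEncBits (k + 1) (2 * v) = pvEncBits k ((2 * v) / 2) ++
          [540, if (2 * v) % 2 = 1 then (1620 : Int) else 540] from rfl,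
        show pvEncBits (k + 1) (2 * v + 1) = pvEncBits k ((2 * v + 1) / 2) ++
          [540, if (2 * v + 1) % 2 = 1 then (1620 : Int) else 540] from rfl,
        show (2 * v) / 2 = v by omega, show (2 * v) % 2 = 0 by omega,
        show (2 * v + 1) / 2 = v by omega, show (2 * v + 1) % 2 = 1 by omega]
    norm_num

theorem pv_lookup (y : Int) (h0 : 0 ≤ y) (h1 : y < 256) :
    pvChunkA y = (PySem.List.pyGet? pvTableList y).getD [] := by
  obtain ⟨n, hn, hlt⟩ : ∃ n : Nat, y = (n : Int) ∧ n < 256 :=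
    ⟨y.toNat, by omega, by omega⟩
  subst hn
  rw [pv_chunk_enc, pv_tab_T, pv_tab_enc 8, PySem.List.pyGet?_natCast]
  simp [hlt]

theorem pv_direct (x : Int) :
    pvChunkA x = (PySem.List.pyGet? pvTableList (PySem.Int.band x 255)).getD [] := by
  have hr : 0 ≤ x % 256 ∧ x % 256 < 256 :=
    ⟨Int.emod_nonneg x (by omega), Int.emod_lt_of_pos x (by omega)⟩
  rw [pv_band255, pv_chunk_mod, pv_lookup (x % 256) hr.1 hr.2]

theorem pv_inv (x : Int) :
    pvChunkA (PySem.Int.band (Int.not x) 255) =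
    (PySem.List.pyGet? pvTableList (255 - PySem.Int.band x 255)).getD [] := by
  have hr : 0 ≤ x % 256 ∧ x % 256 < 256 :=
    ⟨Int.emod_nonneg x (by omega), Int.emod_lt_of_pos x (by omega)⟩
  rw [pv_band255, pv_band255, pv_not, show (-x - 1) % 256 = 255 - x % 256 by omega]
  exact pv_lookup (255 - x % 256) (by omega) (by omega)

-- ===== VERDICT (by name: the statement is the Claim_ definition above) =====
theorem r05d_encode_spec : Claim_equal_r05d_encode := by
  intro address command1 command2 _
  unfold Spec_r05d_encode r05d_encode r05d_encode_alt
  simp only [pv_fold, List.foldl_cons, List.foldl_nil, List.append_assoc]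
  rw [show (PySem.List.pyRange 0 8 1).foldl pvTableStep [[]] = pvTableList from rfl]
  simp only [pv_inv]
  simp only [pv_direct]
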